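-- pv_equiv track=rewrite | github.com/qiliRedHat/etcd-performance-analyzer | elt/etcd_analyzer_elt_utility.py | categorize_deep_drive_metric
-- ===== SOURCE A (Python) =====
-- def categorize_deep_drive_metric(metric_name: str) -> str:
--     """Categorize deep drive metric type"""
--     metric_lower = metric_name.lower()
--
--     if any(keyword in metric_lower for keyword in ['cpu', 'memory']):
--         return 'Resource Usage'
--     elif any(keyword in metric_lower for keyword in ['wal', 'fsync']):
--         return 'WAL Operations'
--     elif any(keyword in metric_lower for keyword in ['disk', 'io', 'throughput', 'iops']):
--         return 'Disk I/O'
--     elif any(keyword in metric_lower for keyword in ['network', 'grpc', 'peer']):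
--         return 'Network I/O'
--     elif any(keyword in metric_lower for keyword in ['backend', 'commit']):
--         return 'Backend Operations'
--     elif any(keyword in metric_lower for keyword in ['compact', 'defrag']):
--         return 'Maintenance Operations'
--     elif any(keyword in metric_lower for keyword in ['proposal', 'leader']):
--         return 'Consensus'
--     else:
--         return 'Other'
-- ===== SOURCE B (Python) =====
-- _LABELS = ['Resource Usage', 'WAL Operations', 'Disk I/O', 'Network I/O',
--            'Backend Operations', 'Maintenance Operations', 'Consensus']
--
-- _KW = {'cpu': 0, 'memory': 0, 'wal': 1, 'fsync': 1,
--        'disk': 2, 'io': 2, 'throughput': 2, 'iops': 2,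
--        'network': 3, 'grpc': 3, 'peer': 3,
--        'backend': 4, 'commit': 4, 'compact': 5, 'defrag': 5,
--        'proposal': 6, 'leader': 6}
--
-- _LENS = [2, 3, 4, 5, 6, 7, 8, 10]  # distinct keyword lengths
--
-- def categorize_deep_drive_metric(metric_name: str) -> str:
--     # Scan the string once: hash every substring whose length is a keyword
--     # length into the keyword table, keeping the smallest category index.
--     s = metric_name.lower()
--     best = 7
--     for i in range(len(s)):
--         for L in _LENS:
--             p = _KW.get(s[i:i + L])
--             if p is not None and p < best:
--                 best = p
--     return _LABELS[best] if best < 7 else 'Other'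
-- ===== Notes on version B (the rewrite author's own statement) =====
-- stated objective: alternative
-- what changed: Inverts the search: instead of testing each of 17 keywords for containment in the string (an if/elif chain of substring scans), B scans the lowered string once, hashing every substring of a keyword length into a keyword-to-priority dict and keeping the minimum category index; min of matched priorities equals the first matching branch.
import Mathlib
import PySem

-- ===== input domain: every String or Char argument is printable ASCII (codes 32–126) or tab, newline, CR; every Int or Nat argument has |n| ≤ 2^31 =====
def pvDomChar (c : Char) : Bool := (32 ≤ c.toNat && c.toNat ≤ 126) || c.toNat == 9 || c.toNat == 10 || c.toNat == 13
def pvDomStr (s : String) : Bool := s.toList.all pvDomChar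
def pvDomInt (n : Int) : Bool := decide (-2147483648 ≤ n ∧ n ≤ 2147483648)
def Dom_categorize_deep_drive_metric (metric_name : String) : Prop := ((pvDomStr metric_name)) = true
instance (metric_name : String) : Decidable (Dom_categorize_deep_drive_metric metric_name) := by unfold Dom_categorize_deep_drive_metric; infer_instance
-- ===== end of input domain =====

-- B inverts the search: instead of testing each keyword against the string, it scans the
-- string once, hashing every substring of a keyword length into a keyword→priority dict
-- and keeping the smallest category index (alternative algorithm, same exact result).

-- ===== PORT A =====
def categorize_deep_drive_metric (metric_name : String) : String :=
  let metric_lower := PySem.Str.lower metric_name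
  if (["cpu", "memory"].any fun keyword => PySem.Str.isIn keyword metric_lower) then
    "Resource Usage"
  else if (["wal", "fsync"].any fun keyword => PySem.Str.isIn keyword metric_lower) then
    "WAL Operations"
  else if (["disk", "io", "throughput", "iops"].any fun keyword => PySem.Str.isIn keyword metric_lower) then
    "Disk I/O"
  else if (["network", "grpc", "peer"].any fun keyword => PySem.Str.isIn keyword metric_lower) then
    "Network I/O"
  else if (["backend", "commit"].any fun keyword => PySem.Str.isIn keyword metric_lower) then
    "Backend Operations"
  else if (["compact", "defrag"].any fun keyword => PySem.Str.isIn keyword metric_lower) then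
    "Maintenance Operations"
  else if (["proposal", "leader"].any fun keyword => PySem.Str.isIn keyword metric_lower) then
    "Consensus"
  else
    "Other"

-- ===== PORT B =====
def pvLabels : List String :=
  ["Resource Usage", "WAL Operations", "Disk I/O", "Network I/O",
   "Backend Operations", "Maintenance Operations", "Consensus"]

def pvKwPairs : List (String × Int) :=
  [("cpu", 0), ("memory", 0), ("wal", 1), ("fsync", 1),
   ("disk", 2), ("io", 2), ("throughput", 2), ("iops", 2),
   ("network", 3), ("grpc", 3), ("peer", 3),
   ("backend", 4), ("commit", 4), ("compact", 5), ("defrag", 5),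
   ("proposal", 6), ("leader", 6)]

def pvKwDict : PySem.Dict String Int := PySem.Dict.ofList pvKwPairs

def pvLens : List Int := [2, 3, 4, 5, 6, 7, 8, 10]

def categorize_deep_drive_metric_alt (metric_name : String) : String :=
  let s := PySem.Str.lower metric_name
  let best := (PySem.List.pyRange 0 (PySem.Str.len s) 1).foldl
    (fun best i =>
      pvLens.foldl (fun best L =>
        match PySem.Dict.get? pvKwDict (PySem.Str.slice s (some i) (some (i + L))) with
        | some p => if p < best then p else best
        | none => best) best) 7
  if best < 7 then PySem.List.pyGetD pvLabels best "Other" else "Other"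

-- ===== PRECONDITION & SPEC =====
def Spec_categorize_deep_drive_metric (metric_name : String) (out : String) : Prop := out = categorize_deep_drive_metric_alt metric_name
instance (metric_name : String) (out : String) : Decidable (Spec_categorize_deep_drive_metric metric_name out) := by unfold Spec_categorize_deep_drive_metric; infer_instance

-- ===== CLAIM (what is proved, stated in full; the proofs are below) =====
def Claim_equal_categorize_deep_drive_metric : Prop := ∀ (metric_name : String), Dom_categorize_deep_drive_metric metric_name → Spec_categorize_deep_drive_metric metric_name (categorize_deep_drive_metric metric_name)

-- ===== LEMMAS AND PROOFS =====

-- the min-update step of B's loop, on one dict-lookup result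
def pvStep (b : Int) (o : Option Int) : Int :=
  match o with
  | some p => if p < b then p else b
  | none => b

-- all dict-lookup results produced by B's double loop, flattened
def pvOpts (s : String) : List (Option Int) :=
  (PySem.List.pyRange 0 (PySem.Str.len s) 1).flatMap
    (fun i => pvLens.map
      (fun L => PySem.Dict.get? pvKwDict (PySem.Str.slice s (some i) (some (i + L)))))

lemma pvStep_le (b : Int) (o : Option Int) : pvStep b o ≤ b := by
  cases o with
  | none => simp [pvStep]
  | some p => simp only [pvStep]; split <;> omega

lemma pvFold_le_init (os : List (Option Int)) (b : Int) : os.foldl pvStep b ≤ b := by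
  induction os generalizing b with
  | nil => simp
  | cons o os ih => exact le_trans (ih (pvStep b o)) (pvStep_le b o)

lemma pvFold_le_mem (os : List (Option Int)) (b p : Int) (h : some p ∈ os) :
    os.foldl pvStep b ≤ p := by
  induction os generalizing b with
  | nil => simp at h
  | cons o os ih =>
    rcases List.mem_cons.mp h with h | h
    · subst h
      refine le_trans (pvFold_le_init os (pvStep b (some p))) ?_
      simp only [pvStep]; split <;> omega
    · exact ih (pvStep b o) h

lemma pvFold_mem_or (os : List (Option Int)) (b : Int) :
    os.foldl pvStep b = b ∨ some (os.foldl pvStep b) ∈ os := by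
  induction os generalizing b with
  | nil => simp
  | cons o os ih =>
    rcases ih (pvStep b o) with h | h
    · rw [List.foldl_cons, h]
      cases o with
      | none => simp [pvStep]
      | some p =>
        simp only [pvStep]
        split
        · exact Or.inr (List.mem_cons_self ..)
        · exact Or.inl rfl
    · exact Or.inr (List.mem_cons_of_mem _ h)

lemma pvKwPairs_facts : ∀ x ∈ pvKwPairs,
    0 ≤ x.2 ∧ x.2 < 7 ∧ ((x.1.toList.length : Int) ∈ pvLens) ∧ x.1.toList ≠ [] := by
  decide

lemma pvGet?_pvKw (x : String) (p : Int) :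
    PySem.Dict.get? pvKwDict x = some p ↔ (x, p) ∈ pvKwPairs := by
  have hnd : pvKwDict.keys.Nodup := by decide
  have hitems : pvKwDict.items = pvKwPairs := by decide
  rw [← hitems]
  exact PySem.Dict.get?_eq_some_iff_mem_items _ _ _ hnd

-- a hit of B's inner loop at position i is exactly a keyword occurring in s
lemma pvMem_opts_iff (s : String) (p : Int) :
    some p ∈ pvOpts s ↔ ∃ kw, (kw, p) ∈ pvKwPairs ∧ PySem.Str.isIn kw s = true := by
  constructor
  · rintro hm
    simp only [pvOpts, List.mem_flatMap, List.mem_map] at hm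
    obtain ⟨i, hi, L, hL, hget⟩ := hm
    obtain ⟨hi0, hin⟩ := PySem.List.mem_pyRange_one.mp hi
    have hkw := (pvGet?_pvKw _ p).mp hget
    refine ⟨_, hkw, ?_⟩
    have hLpos : (0:Int) ≤ i + L := by
      have : (2:Int) ≤ L := by
        simp only [pvLens, List.mem_cons, List.not_mem_nil, or_false] at hL
        rcases hL with rfl|rfl|rfl|rfl|rfl|rfl|rfl|rfl <;> omega
      omega
    have htl : (PySem.Str.slice s (some i) (some (i + L))).toList
        = (PySem.Str.slice s (some i) (some (i + L))).toList := rfl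
    have hsl : (PySem.Str.slice s (some i) (some (i + L))).toList
        = List.take ((i + L).toNat - i.toNat) (List.drop i.toNat s.toList) := by
      rw [PySem.Str.toList_slice, PySem.Chars.slice_eq_listSlice,
        PySem.List.slice_toNat _ hi0 hLpos]
    have hpre : (PySem.Str.slice s (some i) (some (i + L))).toList <+: List.drop i.toNat s.toList := by
      rw [hsl]; exact List.take_prefix _ _
    have : PySem.Chars.isIn (PySem.Str.slice s (some i) (some (i + L))).toList s.toList = true :=
      (PySem.Chars.exists_prefix_drop_iff_isIn _ _).mp ⟨i.toNat, hpre⟩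
    simpa [PySem.Str.isIn] using this
  · rintro ⟨kw, hkw, hin⟩
    obtain ⟨-, -, hlen, hne⟩ := pvKwPairs_facts _ hkw
    have hin' : PySem.Chars.isIn kw.toList s.toList = true := by
      simpa [PySem.Str.isIn] using hin
    obtain ⟨j, hpre⟩ := (PySem.Chars.exists_prefix_drop_iff_isIn _ _).mpr hin'
    have hjlt : j < s.toList.length := by
      by_contra hge
      rw [List.drop_eq_nil_of_le (by omega)] at hpre
      exact hne (List.prefix_nil.mp hpre)
    simp only [pvOpts, List.mem_flatMap, List.mem_map]
    refine ⟨(j : Int), PySem.List.mem_pyRange_one.mpr ⟨by positivity, ?_⟩,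
      (kw.toList.length : Int), hlen, ?_⟩
    · simp only [PySem.Str.len]; exact_mod_cast hjlt
    · rw [pvGet?_pvKw]
      have hsl : PySem.Str.slice s (some (j : Int)) (some ((j : Int) + (kw.toList.length : Int)))
          = kw := by
        rw [← String.toList_inj, PySem.Str.toList_slice, PySem.Chars.slice_eq_listSlice,
          PySem.List.slice_natCast_add]
        exact ((List.prefix_iff_eq_take.mp hpre).symm)
      rw [hsl]; exact hkw

-- B's loop result: the fold over pvOpts
lemma pvAlt_eq_fold (metric_name : String) :
    categorize_deep_drive_metric_alt metric_name =
      (if (pvOpts (PySem.Str.lower metric_name)).foldl pvStep 7 < 7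
       then PySem.List.pyGetD pvLabels ((pvOpts (PySem.Str.lower metric_name)).foldl pvStep 7) "Other"
       else "Other") := by
  simp only [categorize_deep_drive_metric_alt, pvOpts, List.foldl_flatMap, List.foldl_map]
  rfl

-- ===== VERDICT (by name: the statement is the Claim_ definition above) =====
set_option maxHeartbeats 1600000 in
theorem categorize_deep_drive_metric_spec : Claim_equal_categorize_deep_drive_metric := by
  intro m _
  unfold Spec_categorize_deep_drive_metric
  rw [pvAlt_eq_fold]
  set low := PySem.Str.lower m with hlow
  set r := (pvOpts low).foldl pvStep 7 with hr
  clear hr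
  -- M p : some keyword of priority p occurs in low
  have hM : ∀ p, some p ∈ pvOpts low ↔ ∃ kw, (kw, p) ∈ pvKwPairs ∧ PySem.Str.isIn kw low = true :=
    fun p => pvMem_opts_iff low p
  have hub : r ≤ 7 := pvFold_le_init _ _
  have hor : r = 7 ∨ some r ∈ pvOpts low := pvFold_mem_or _ _
  have hle : ∀ p, (∃ kw, (kw, p) ∈ pvKwPairs ∧ PySem.Str.isIn kw low = true) → r ≤ p :=
    fun p hp => pvFold_le_mem _ _ _ ((hM p).mpr hp)
  have hlb : 0 ≤ r := by
    rcases hor with h | h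
    · omega
    · obtain ⟨kw, hkw, -⟩ := (hM r).mp h
      exact (pvKwPairs_facts _ hkw).1
  have hne : ∀ p, p < 7 → ¬ (∃ kw, (kw, p) ∈ pvKwPairs ∧ PySem.Str.isIn kw low = true) → r ≠ p := by
    intro p hp7 hp hrp
    rcases hor with h | h
    · omega
    · exact hp (hrp ▸ (hM r).mp h)
  unfold categorize_deep_drive_metric
  simp only [List.any_cons, List.any_nil, Bool.or_false, ← hlow]
  clear_value r low
  by_cases h0 : (∃ kw, (kw, (0:Int)) ∈ pvKwPairs ∧ PySem.Str.isIn kw low = true)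
  · have hrk : r = 0 := by have := hle 0 h0; omega
    have hb : (PySem.Str.isIn "cpu" low || (PySem.Str.isIn "memory" low)) = true := by
      obtain ⟨kw, hkw, hin⟩ := h0
      simp [pvKwPairs, Prod.ext_iff] at hkw
      rcases hkw with rfl|rfl <;>
        simp only [hin, Bool.true_or, Bool.or_true]
    rw [hb, if_pos rfl, hrk]
    decide
  · have hbk0 : (PySem.Str.isIn "cpu" low || (PySem.Str.isIn "memory" low)) = false := by
      have e0 : PySem.Str.isIn "cpu" low = false := by
        cases hx : PySem.Str.isIn "cpu" low
        · rfl
        · exact absurd ⟨"cpu", by decide, hx⟩ h0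
      have e1 : PySem.Str.isIn "memory" low = false := by
        cases hx : PySem.Str.isIn "memory" low
        · rfl
        · exact absurd ⟨"memory", by decide, hx⟩ h0
      rw [e0, e1]
      rfl
    rw [hbk0]
    simp only [Bool.false_eq_true, if_false]
    have hned0 : r ≠ 0 := hne 0 (by omega) h0
    by_cases h1 : (∃ kw, (kw, (1:Int)) ∈ pvKwPairs ∧ PySem.Str.isIn kw low = true)
    · have hrk : r = 1 := by have := hle 1 h1; omega
      have hb : (PySem.Str.isIn "wal" low || (PySem.Str.isIn "fsync" low)) = true := by
        obtain ⟨kw, hkw, hin⟩ := h1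
        simp [pvKwPairs, Prod.ext_iff] at hkw
        rcases hkw with rfl|rfl <;>
          simp only [hin, Bool.true_or, Bool.or_true]
      rw [hb, if_pos rfl, hrk]
      decide
    · have hbk1 : (PySem.Str.isIn "wal" low || (PySem.Str.isIn "fsync" low)) = false := by
        have e0 : PySem.Str.isIn "wal" low = false := by
          cases hx : PySem.Str.isIn "wal" low
          · rfl
          · exact absurd ⟨"wal", by decide, hx⟩ h1
        have e1 : PySem.Str.isIn "fsync" low = false := by
          cases hx : PySem.Str.isIn "fsync" low
          · rfl
          · exact absurd ⟨"fsync", by decide, hx⟩ h1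
        rw [e0, e1]
        rfl
      rw [hbk1]
      simp only [Bool.false_eq_true, if_false]
      have hned1 : r ≠ 1 := hne 1 (by omega) h1
      by_cases h2 : (∃ kw, (kw, (2:Int)) ∈ pvKwPairs ∧ PySem.Str.isIn kw low = true)
      · have hrk : r = 2 := by have := hle 2 h2; omega
        have hb : (PySem.Str.isIn "disk" low || (PySem.Str.isIn "io" low || (PySem.Str.isIn "throughput" low || (PySem.Str.isIn "iops" low)))) = true := by
          obtain ⟨kw, hkw, hin⟩ := h2
          simp [pvKwPairs, Prod.ext_iff] at hkw
          rcases hkw with rfl|rfl|rfl|rfl <;>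
            simp only [hin, Bool.true_or, Bool.or_true]
        rw [hb, if_pos rfl, hrk]
        decide
      · have hbk2 : (PySem.Str.isIn "disk" low || (PySem.Str.isIn "io" low || (PySem.Str.isIn "throughput" low || (PySem.Str.isIn "iops" low)))) = false := by
          have e0 : PySem.Str.isIn "disk" low = false := by
            cases hx : PySem.Str.isIn "disk" low
            · rfl
            · exact absurd ⟨"disk", by decide, hx⟩ h2
          have e1 : PySem.Str.isIn "io" low = false := by
            cases hx : PySem.Str.isIn "io" low
            · rfl
            · exact absurd ⟨"io", by decide, hx⟩ h2
          have e2 : PySem.Str.isIn "throughput" low = false := by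
            cases hx : PySem.Str.isIn "throughput" low
            · rfl
            · exact absurd ⟨"throughput", by decide, hx⟩ h2
          have e3 : PySem.Str.isIn "iops" low = false := by
            cases hx : PySem.Str.isIn "iops" low
            · rfl
            · exact absurd ⟨"iops", by decide, hx⟩ h2
          rw [e0, e1, e2, e3]
          rfl
        rw [hbk2]
        simp only [Bool.false_eq_true, if_false]
        have hned2 : r ≠ 2 := hne 2 (by omega) h2
        by_cases h3 : (∃ kw, (kw, (3:Int)) ∈ pvKwPairs ∧ PySem.Str.isIn kw low = true)
        · have hrk : r = 3 := by have := hle 3 h3; omega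
          have hb : (PySem.Str.isIn "network" low || (PySem.Str.isIn "grpc" low || (PySem.Str.isIn "peer" low))) = true := by
            obtain ⟨kw, hkw, hin⟩ := h3
            simp [pvKwPairs, Prod.ext_iff] at hkw
            rcases hkw with rfl|rfl|rfl <;>
              simp only [hin, Bool.true_or, Bool.or_true]
          rw [hb, if_pos rfl, hrk]
          decide
        · have hbk3 : (PySem.Str.isIn "network" low || (PySem.Str.isIn "grpc" low || (PySem.Str.isIn "peer" low))) = false := by
            have e0 : PySem.Str.isIn "network" low = false := by
              cases hx : PySem.Str.isIn "network" low
              · rfl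
              · exact absurd ⟨"network", by decide, hx⟩ h3
            have e1 : PySem.Str.isIn "grpc" low = false := by
              cases hx : PySem.Str.isIn "grpc" low
              · rfl
              · exact absurd ⟨"grpc", by decide, hx⟩ h3
            have e2 : PySem.Str.isIn "peer" low = false := by
              cases hx : PySem.Str.isIn "peer" low
              · rfl
              · exact absurd ⟨"peer", by decide, hx⟩ h3
            rw [e0, e1, e2]
            rfl
          rw [hbk3]
          simp only [Bool.false_eq_true, if_false]
          have hned3 : r ≠ 3 := hne 3 (by omega) h3
          by_cases h4 : (∃ kw, (kw, (4:Int)) ∈ pvKwPairs ∧ PySem.Str.isIn kw low = true)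
          · have hrk : r = 4 := by have := hle 4 h4; omega
            have hb : (PySem.Str.isIn "backend" low || (PySem.Str.isIn "commit" low)) = true := by
              obtain ⟨kw, hkw, hin⟩ := h4
              simp [pvKwPairs, Prod.ext_iff] at hkw
              rcases hkw with rfl|rfl <;>
                simp only [hin, Bool.true_or, Bool.or_true]
            rw [hb, if_pos rfl, hrk]
            decide
          · have hbk4 : (PySem.Str.isIn "backend" low || (PySem.Str.isIn "commit" low)) = false := by
              have e0 : PySem.Str.isIn "backend" low = false := by
                cases hx : PySem.Str.isIn "backend" low
                · rfl
                · exact absurd ⟨"backend", by decide, hx⟩ h4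
              have e1 : PySem.Str.isIn "commit" low = false := by
                cases hx : PySem.Str.isIn "commit" low
                · rfl
                · exact absurd ⟨"commit", by decide, hx⟩ h4
              rw [e0, e1]
              rfl
            rw [hbk4]
            simp only [Bool.false_eq_true, if_false]
            have hned4 : r ≠ 4 := hne 4 (by omega) h4
            by_cases h5 : (∃ kw, (kw, (5:Int)) ∈ pvKwPairs ∧ PySem.Str.isIn kw low = true)
            · have hrk : r = 5 := by have := hle 5 h5; omega
              have hb : (PySem.Str.isIn "compact" low || (PySem.Str.isIn "defrag" low)) = true := by
                obtain ⟨kw, hkw, hin⟩ := h5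
                simp [pvKwPairs, Prod.ext_iff] at hkw
                rcases hkw with rfl|rfl <;>
                  simp only [hin, Bool.true_or, Bool.or_true]
              rw [hb, if_pos rfl, hrk]
              decide
            · have hbk5 : (PySem.Str.isIn "compact" low || (PySem.Str.isIn "defrag" low)) = false := by
                have e0 : PySem.Str.isIn "compact" low = false := by
                  cases hx : PySem.Str.isIn "compact" low
                  · rfl
                  · exact absurd ⟨"compact", by decide, hx⟩ h5
                have e1 : PySem.Str.isIn "defrag" low = false := by
                  cases hx : PySem.Str.isIn "defrag" low
                  · rfl
                  · exact absurd ⟨"defrag", by decide, hx⟩ h5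
                rw [e0, e1]
                rfl
              rw [hbk5]
              simp only [Bool.false_eq_true, if_false]
              have hned5 : r ≠ 5 := hne 5 (by omega) h5
              by_cases h6 : (∃ kw, (kw, (6:Int)) ∈ pvKwPairs ∧ PySem.Str.isIn kw low = true)
              · have hrk : r = 6 := by have := hle 6 h6; omega
                have hb : (PySem.Str.isIn "proposal" low || (PySem.Str.isIn "leader" low)) = true := by
                  obtain ⟨kw, hkw, hin⟩ := h6
                  simp [pvKwPairs, Prod.ext_iff] at hkw
                  rcases hkw with rfl|rfl <;>
                    simp only [hin, Bool.true_or, Bool.or_true]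
                rw [hb, if_pos rfl, hrk]
                decide
              · have hbk6 : (PySem.Str.isIn "proposal" low || (PySem.Str.isIn "leader" low)) = false := by
                  have e0 : PySem.Str.isIn "proposal" low = false := by
                    cases hx : PySem.Str.isIn "proposal" low
                    · rfl
                    · exact absurd ⟨"proposal", by decide, hx⟩ h6
                  have e1 : PySem.Str.isIn "leader" low = false := by
                    cases hx : PySem.Str.isIn "leader" low
                    · rfl
                    · exact absurd ⟨"leader", by decide, hx⟩ h6
                  rw [e0, e1]
                  rfl
                rw [hbk6]
                simp only [Bool.false_eq_true, if_false]
                have hned6 : r ≠ 6 := hne 6 (by omega) h6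
                have hr7 : r = 7 := by
                  rcases hor with h | h
                  · exact h
                  · obtain ⟨kw, hkw, -⟩ := (hM r).mp h
                    have hbnds := pvKwPairs_facts _ hkw
                    have hx1 := hbnds.1
                    have hx2 := hbnds.2.1
                    omega
                rw [hr7]
                decide
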